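-- pv_equiv track=rewrite | github.com/cestcedric/LeetCode | 2021/06_June/Week_2/2021_06_11_stone_game_7.py | stoneGameVII
-- ===== SOURCE A (Python) =====
-- def stoneGameVII(stones: list) -> int:
--     n = len(stones)
--     scores = [ [ 0 for _ in range(n) ] for _ in range(n) ]
--
--     # reverse problem: start with no stones and add the greater value one
--     for i in range(n-2, -1, -1):
--         total = stones[i]
--         for j in range(i+1, n):
--             total += stones[j]
--             scores[i][j] = max(
--                 total - stones[i] - scores[i+1][j],
--                 total - stones[j] - scores[i][j-1])
--     return scores[0][n-1]
-- ===== SOURCE B (Python) =====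
-- def stoneGameVII(stones: list) -> int:
--     # Top-down memoized recursion with O(1) range sums from a prefix-sum array.
--     n = len(stones)
--     pre = [0]
--     s = 0
--     for x in stones:
--         s += x
--         pre.append(s)
--     memo = {}
--
--     def rec(i, j):
--         if i >= j:
--             return 0
--         if (i, j) in memo:
--             return memo[(i, j)]
--         s = pre[j + 1] - pre[i]
--         v = max(s - stones[i] - rec(i + 1, j),
--                 s - stones[j] - rec(i, j - 1))
--         memo[(i, j)] = v
--         return v
--
--     return rec(0, n - 1)
-- ===== Notes on version B (the rewrite author's own statement) =====
-- stated objective: alternative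
-- what changed: Replaces A's bottom-up n-by-n table filled right-to-left with running row sums by top-down memoized recursion rec(i,j) over intervals with O(1) range sums from a precomputed prefix-sum array.
import Mathlib
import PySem

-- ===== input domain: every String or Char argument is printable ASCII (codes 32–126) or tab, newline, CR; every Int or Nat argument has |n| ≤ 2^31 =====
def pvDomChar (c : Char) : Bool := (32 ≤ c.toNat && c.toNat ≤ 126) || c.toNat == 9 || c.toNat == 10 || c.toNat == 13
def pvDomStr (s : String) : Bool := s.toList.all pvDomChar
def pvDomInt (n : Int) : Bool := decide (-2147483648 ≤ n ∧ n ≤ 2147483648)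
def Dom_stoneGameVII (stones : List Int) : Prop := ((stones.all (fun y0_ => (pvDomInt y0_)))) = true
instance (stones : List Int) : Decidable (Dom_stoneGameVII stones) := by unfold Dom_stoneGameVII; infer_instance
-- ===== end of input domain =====

-- B replaces A's bottom-up n×n table (filled right-to-left with a running row sum)
-- by top-down memoized recursion over intervals with a prefix-sum array.


-- ===== PORT A =====
-- xs[i] for indices that are provably in range in both programs (exact there: pyGet? is some)
def pvIdx (xs : List Int) (i : Int) : Int := (PySem.List.pyGet? xs i).getD 0
def pvRowGet (m : List (List Int)) (i : Int) : List Int := (PySem.List.pyGet? m i).getD []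
def pvMGet (m : List (List Int)) (i j : Int) : Int := pvIdx (pvRowGet m i) j
-- scores[i][j] = v for nonnegative in-range i, j (the only uses here)
def pvMSet (m : List (List Int)) (i j : Int) (v : Int) : List (List Int) :=
  m.set i.toNat ((pvRowGet m i).set j.toNat v)

def stoneGameVII (stones : List Int) : Int :=
  let n := stones.length
  let scores : List (List Int) :=
    (List.range n).map (fun _ => (List.range n).map (fun _ => (0 : Int)))
  let scores := (PySem.List.pyRange ((n : Int) - 2) (-1) (-1)).foldl (fun scores i =>
      let total := pvIdx stones i
      let st := (PySem.List.pyRange (i + 1) (n : Int) 1).foldl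
        (fun (p : Int × List (List Int)) j =>
          let total := p.1 + pvIdx stones j
          (total, pvMSet p.2 i j
            (max (total - pvIdx stones i - pvMGet p.2 (i + 1) j)
                 (total - pvIdx stones j - pvMGet p.2 i (j - 1)))))
        (total, scores)
      st.2) scores
  pvMGet scores 0 ((n : Int) - 1)

-- ===== PORT B =====
-- rec(i, j) of Source B: returns the value and the updated memo dict (Python mutates `memo` in place)
def recB (stones pre : List Int) (i j : Int) (memo : PySem.Dict (Int × Int) Int) :
    Int × PySem.Dict (Int × Int) Int :=
  if i ≥ j then (0, memo)
  else
    match memo.get? (i, j) with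
    | some v => (v, memo)
    | none =>
      let r1 := recB stones pre (i + 1) j memo
      let r2 := recB stones pre i (j - 1) r1.2
      let s := pvIdx pre (j + 1) - pvIdx pre i
      let v := max (s - pvIdx stones i - r1.1) (s - pvIdx stones j - r2.1)
      (v, r2.2.insert (i, j) v)
termination_by (j - i).toNat
decreasing_by all_goals omega

def stoneGameVII_alt (stones : List Int) : Int :=
  let n := stones.length
  let ps := stones.foldl (fun (p : List Int × Int) x => (p.1 ++ [p.2 + x], p.2 + x)) ([0], 0)
  (recB stones ps.1 0 ((n : Int) - 1) PySem.Dict.empty).1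

-- ===== PRECONDITION & SPEC =====
-- Pre_ excludes only the empty list, on which A raises IndexError.
def Pre_stoneGameVII (stones : List Int) : Prop := stones ≠ []
instance (stones : List Int) : Decidable (Pre_stoneGameVII stones) := by
  unfold Pre_stoneGameVII; infer_instance
def pvWitness_stoneGameVII : List Int := [5, 3, 1, 4, 2]

def Spec_stoneGameVII (stones : List Int) (out : Int) : Prop := out = stoneGameVII_alt stones
instance (stones : List Int) (out : Int) : Decidable (Spec_stoneGameVII stones out) := by
  unfold Spec_stoneGameVII; infer_instance

-- ===== CLAIM (what is proved, stated in full; the proofs are below) =====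
def Claim_equal_stoneGameVII : Prop := ∀ (stones : List Int), Dom_stoneGameVII stones → Pre_stoneGameVII stones → Spec_stoneGameVII stones (stoneGameVII stones)

-- ===== LEMMAS AND PROOFS =====

-- mathematical value of the interval DP: el, prefix sums, and g d i = scores[i][i+d]
def el (s : List Int) (k : Nat) : Int := s.getD k 0
def pfx (s : List Int) (k : Nat) : Int := ((List.range k).map (el s)).sum

def g (s : List Int) : Nat → Nat → Int
  | 0, _ => 0
  | d + 1, i =>
      max (pfx s (i + d + 2) - pfx s i - el s i - g s d (i + 1))
          (pfx s (i + d + 2) - pfx s i - el s (i + d + 1) - g s d i)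

lemma pfx_zero (s : List Int) : pfx s 0 = 0 := by simp [pfx]

lemma pfx_succ (s : List Int) (k : Nat) : pfx s (k + 1) = pfx s k + el s k := by
  simp [pfx, List.range_succ]

lemma pfx_cons_succ (x : Int) (xs : List Int) (k : Nat) :
    pfx (x :: xs) (k + 1) = x + pfx xs k := by
  induction k with
  | zero => simp [pfx_succ, pfx_zero, el]
  | succ k ih => rw [pfx_succ, ih, pfx_succ]; simp [el]; ring

lemma pvIdx_natCast (xs : List Int) (m : Nat) : pvIdx xs (m : Int) = xs.getD m 0 := by
  simp [pvIdx, PySem.List.pyGet?_natCast, List.getD_eq_getElem?_getD]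

lemma pvIdx_map_range {n k : Nat} (f : Nat → Int) (hk : k < n) :
    pvIdx ((List.range n).map f) (k : Int) = f k := by
  rw [pvIdx_natCast]
  simp [List.getD_eq_getElem?_getD, hk]

lemma pvRowGet_map_range {n k : Nat} (f : Nat → List Int) (hk : k < n) :
    pvRowGet ((List.range n).map f) (k : Int) = f k := by
  simp [pvRowGet, hk]

lemma set_map_range {α : Type} {n k : Nat} (f : Nat → α) (v : α) (_hk : k < n) :
    ((List.range n).map f).set k v
      = (List.range n).map (fun r => if r = k then v else f r) := by
  apply List.ext_getElem
  · simp
  · intro i h1 h2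
    simp only [List.getElem_set, List.getElem_map, List.getElem_range]
    by_cases h : k = i <;> simp [h, eq_comm]

-- ---- B side ----

lemma pre_fold (stones : List Int) : ∀ (c : List Int) (a : Int),
    stones.foldl (fun (p : List Int × Int) x => (p.1 ++ [p.2 + x], p.2 + x)) (c ++ [a], a)
      = (c ++ (List.range (stones.length + 1)).map (fun k => a + pfx stones k),
         a + pfx stones stones.length) := by
  induction stones with
  | nil => intro c a; simp [pfx_zero, List.range_succ]
  | cons x xs ih =>
      intro c a
      simp only [List.foldl_cons]
      have h := ih (c ++ [a]) (a + x)
      rw [show c ++ [a] ++ [a + x] = (c ++ [a]) ++ [a + x] by simp] at h ⊢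
      rw [h, Prod.mk.injEq]
      refine ⟨?_, ?_⟩
      · rw [List.append_assoc]
        congr 1
        conv_rhs => rw [show (x :: xs).length + 1 = (xs.length + 1) + 1 by simp,
            List.range_succ_eq_map]
        rw [List.map_cons, List.map_map, pfx_zero, add_zero, List.singleton_append]
        congr 1
        apply List.map_congr_left; intro k _
        simp only [Function.comp_apply, Nat.succ_eq_add_one, pfx_cons_succ]; ring
      · simp [pfx_cons_succ]; ring

lemma pre_eq (stones : List Int) :
    (stones.foldl (fun (p : List Int × Int) x => (p.1 ++ [p.2 + x], p.2 + x)) ([0], 0)).1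
      = (List.range (stones.length + 1)).map (fun k => pfx stones k) := by
  have h := pre_fold stones [] 0
  simp only [List.nil_append] at h
  rw [h]
  simp

-- gI: the intended value of rec(i, j) for in-range arguments
def gI (stones : List Int) (i j : Int) : Int := g stones (j - i).toNat i.toNat

-- memo invariant: every stored entry is the correct interval value
def InvB (stones : List Int) (m : PySem.Dict (Int × Int) Int) : Prop :=
  ∀ p v, m.get? p = some v → v = gI stones p.1 p.2

lemma recB_correct (stones : List Int) :
    ∀ (d : Nat) (i j : Int) (m : PySem.Dict (Int × Int) Int),
      (j - i).toNat = d → 0 ≤ i → j < stones.length → InvB stones m →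
      (recB stones ((List.range (stones.length + 1)).map (fun k => pfx stones k)) i j m).1
          = gI stones i j
        ∧ InvB stones
          (recB stones ((List.range (stones.length + 1)).map (fun k => pfx stones k)) i j m).2 := by
  intro d
  induction d using Nat.strong_induction_on with
  | _ d ih =>
    intro i j m hd hi hj hm
    rw [recB]
    by_cases hij : i ≥ j
    · rw [if_pos hij]
      refine ⟨?_, hm⟩
      simp only [gI]
      rw [show (j - i).toNat = 0 by omega]
      simp [g]
    · rw [if_neg hij]
      have hlt : i < j := by omega
      match hget : m.get? (i, j) with
      | some v =>
          simp only
          exact ⟨hm _ _ hget, hm⟩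
      | none =>
          simp only
          have h1 := ih (d - 1) (by omega) (i + 1) j m (by omega) (by omega) hj hm
          have h2 := ih (d - 1) (by omega) i (j - 1)
            (recB stones ((List.range (stones.length + 1)).map (fun k => pfx stones k)) (i + 1) j m).2
            (by omega) hi (by omega) h1.2
          -- the computed value equals gI i j
          have hval :
              max (pvIdx ((List.range (stones.length + 1)).map (fun k => pfx stones k)) (j + 1)
                    - pvIdx ((List.range (stones.length + 1)).map (fun k => pfx stones k)) i
                    - pvIdx stones i - gI stones (i + 1) j)
                  (pvIdx ((List.range (stones.length + 1)).map (fun k => pfx stones k)) (j + 1)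
                    - pvIdx ((List.range (stones.length + 1)).map (fun k => pfx stones k)) i
                    - pvIdx stones j - gI stones i (j - 1))
              = gI stones i j := by
            lift i to Nat using hi with i' hi'
            lift j to Nat using (by omega : (0:Int) ≤ j) with j' hj'
            have hij' : i' < j' := by exact_mod_cast hlt
            have hjn : j' < stones.length := by exact_mod_cast hj
            rw [show ((j' : Int) + 1) = ((j' + 1 : Nat) : Int) by push_cast; ring,
                pvIdx_map_range _ (by omega), pvIdx_map_range _ (by omega),
                pvIdx_natCast, pvIdx_natCast]
            simp only [gI]
            rw [show ((j' : Int) - ((i' : Int) + 1)).toNat = j' - (i' + 1) by omega,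
                show (((i' : Int) + 1)).toNat = i' + 1 by omega,
                show ((j' : Int) - 1 - (i' : Int)).toNat = j' - 1 - i' by omega,
                show ((i' : Int)).toNat = i' by omega,
                show ((j' : Int) - (i' : Int)).toNat = j' - i' by omega]
            obtain ⟨d', hd'⟩ : ∃ d', j' - i' = d' + 1 := ⟨j' - i' - 1, by omega⟩
            rw [hd', show j' - (i' + 1) = d' by omega, show j' - 1 - i' = d' by omega]
            simp only [g]
            rw [show i' + d' + 2 = j' + 1 by omega, show i' + d' + 1 = j' by omega]
            unfold el
            rfl
          constructor
          · rw [← hval, h1.1, h2.1]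
          · intro p v hpv
            rw [PySem.Dict.get?_insert] at hpv
            by_cases hp : p = (i, j)
            · rw [if_pos hp] at hpv
              cases hpv
              rw [hp, ← hval, h1.1, h2.1]
            · rw [if_neg hp] at hpv
              exact h2.2 _ _ hpv

theorem stoneGameVII_alt_eq_g (stones : List Int) (h : stones ≠ []) :
    stoneGameVII_alt stones = g stones (stones.length - 1) 0 := by
  have hn : 1 ≤ stones.length := List.length_pos_of_ne_nil h
  unfold stoneGameVII_alt
  simp only [pre_eq]
  have hc := (recB_correct stones ((stones.length : Int) - 1 - 0).toNat 0
    ((stones.length : Int) - 1) PySem.Dict.empty rfl (by omega) (by omega)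
    (by intro p v hpv; rw [PySem.Dict.get?_empty] at hpv; cases hpv)).1
  rw [hc]
  simp only [gI]
  congr 1; omega

-- ---- A side ----

-- an n×n matrix of Int given by an entry function
def mat (n : Nat) (f : Nat → Nat → Int) : List (List Int) :=
  (List.range n).map (fun r => (List.range n).map (fun j => f r j))

-- entries of A's table once rows ≥ k are fully processed
def fentry (stones : List Int) (k r j : Nat) : Int :=
  if k ≤ r ∧ r < j then g stones (j - r) r else 0

-- entries while row k is filled up to column jc
def pentry (stones : List Int) (k jc r j : Nat) : Int :=
  if k ≤ r ∧ r < j ∧ (r = k → j ≤ jc) then g stones (j - r) r else 0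

lemma mat_congr {n : Nat} {f h : Nat → Nat → Int}
    (H : ∀ r j, r < n → j < n → f r j = h r j) : mat n f = mat n h := by
  unfold mat
  apply List.map_congr_left; intro r hr
  apply List.map_congr_left; intro j hj
  exact H r j (List.mem_range.mp hr) (List.mem_range.mp hj)

lemma pvMGet_mat {n : Nat} (f : Nat → Nat → Int) {r j : Nat} (hr : r < n) (hj : j < n) :
    pvMGet (mat n f) (r : Int) (j : Int) = f r j := by
  unfold pvMGet mat
  rw [pvRowGet_map_range _ hr, pvIdx_map_range _ hj]

lemma pvMSet_mat {n : Nat} (f : Nat → Nat → Int) (v : Int) {k j0 : Nat}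
    (hk : k < n) (hj : j0 < n) :
    pvMSet (mat n f) (k : Int) (j0 : Int) v
      = mat n (fun r j => if r = k ∧ j = j0 then v else f r j) := by
  unfold pvMSet mat
  rw [pvRowGet_map_range _ hk]
  simp only [Int.toNat_natCast]
  rw [set_map_range _ _ hj, set_map_range _ _ hk]
  apply List.map_congr_left; intro r hr
  by_cases h : r = k
  · subst h
    rw [if_pos rfl]
    apply List.map_congr_left; intro j _
    by_cases hjj : j = j0 <;> simp [hjj]
  · simp only [if_neg h]
    apply List.map_congr_left; intro j _
    simp [h]

-- the partially filled row-k matrix entries, as read by the inner loop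
lemma pentry_read_down {stones : List Int} {k jc : Nat} (hk : k ≤ jc) :
    pentry stones k jc (k + 1) (jc + 1) = g stones (jc - k) (k + 1) := by
  unfold pentry
  rcases Nat.lt_or_ge k jc with h | h
  · rw [if_pos]
    · congr 1; omega
    · refine ⟨by omega, by omega, by omega⟩
  · have hkj : k = jc := by omega
    subst hkj
    rw [if_neg (by omega)]
    simp [g]
lemma pentry_read_left {stones : List Int} {k jc : Nat} (hk : k ≤ jc) :
    pentry stones k jc k jc = g stones (jc - k) k := by
  unfold pentry
  rcases Nat.lt_or_ge k jc with h | h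
  · rw [if_pos ⟨by omega, by omega, by omega⟩]
  · have hkj : k = jc := by omega
    subst hkj
    rw [if_neg (by omega)]
    simp [g]

-- one write of the inner loop advances pentry by one column
lemma pentry_write {stones : List Int} {k jc : Nat} (hk : k ≤ jc) :
    mat stones.length (fun r j => if r = k ∧ j = jc + 1 then g stones (jc + 1 - k) k
        else pentry stones k jc r j)
      = mat stones.length (pentry stones k (jc + 1)) := by
  apply mat_congr; intro r j _ _
  by_cases hr : r = k
  · subst hr
    by_cases hj : j = jc + 1
    · subst hj
      rw [if_pos ⟨rfl, rfl⟩]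
      unfold pentry
      rw [if_pos ⟨le_refl _, by omega, by omega⟩]
    · rw [if_neg (by tauto)]
      unfold pentry
      by_cases hc : r < j ∧ j ≤ jc
      · rw [if_pos ⟨le_refl _, by omega, by omega⟩, if_pos ⟨le_refl _, by omega, by omega⟩]
      · rw [if_neg (by intro h; exact hc ⟨h.2.1, by have := h.2.2 rfl; omega⟩),
            if_neg (by intro h; exact hc ⟨h.2.1, by have := h.2.2 rfl; omega⟩)]
  · rw [if_neg (by tauto)]
    unfold pentry
    by_cases hc : r ≤ k ∧ True
    all_goals
      by_cases hc2 : k ≤ r ∧ r < j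
      · rw [if_pos ⟨hc2.1, hc2.2, by tauto⟩, if_pos ⟨hc2.1, hc2.2, by tauto⟩]
      · rw [if_neg (by tauto), if_neg (by tauto)]

-- the inner loop: from column jc, total pfx(jc+1)-pfx(k), matrix pentry k jc,
-- it finishes the row: total pfx(n)-pfx(k), matrix pentry k (n-1)
lemma inner_fold (stones : List Int) (k : Nat) :
    ∀ (d jc : Nat), k ≤ jc → jc + 1 + d = stones.length →
    (PySem.List.pyRange ((jc : Int) + 1) (stones.length : Int) 1).foldl
      (fun (p : Int × List (List Int)) j => (p.1 + pvIdx stones j,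
        pvMSet p.2 (k : Int) j
          (max (p.1 + pvIdx stones j - pvIdx stones (k : Int) - pvMGet p.2 ((k : Int) + 1) j)
               (p.1 + pvIdx stones j - pvIdx stones j - pvMGet p.2 (k : Int) (j - 1)))))
      (pfx stones (jc + 1) - pfx stones k, mat stones.length (pentry stones k jc))
    = (pfx stones stones.length - pfx stones k,
       mat stones.length (pentry stones k (stones.length - 1))) := by
  intro d
  induction d with
  | zero =>
      intro jc hk hn
      rw [PySem.List.pyRange_one_eq_nil (by omega), List.foldl_nil,
          show jc + 1 = stones.length by omega, show stones.length - 1 = jc by omega]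
  | succ d ih =>
      intro jc hk hn
      have hjc1 : jc + 1 < stones.length := by omega
      rw [PySem.List.pyRange_one_cons (by omega), List.foldl_cons]
      dsimp only
      have hstep :
          ((pfx stones (jc + 1) - pfx stones k + pvIdx stones ((jc : Int) + 1),
            pvMSet (mat stones.length (pentry stones k jc)) (k : Int) ((jc : Int) + 1)
              (max (pfx stones (jc + 1) - pfx stones k + pvIdx stones ((jc : Int) + 1)
                      - pvIdx stones (k : Int)
                      - pvMGet (mat stones.length (pentry stones k jc)) ((k : Int) + 1)
                          ((jc : Int) + 1))
                   (pfx stones (jc + 1) - pfx stones k + pvIdx stones ((jc : Int) + 1)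
                      - pvIdx stones ((jc : Int) + 1)
                      - pvMGet (mat stones.length (pentry stones k jc)) (k : Int)
                          ((jc : Int) + 1 - 1)))) : Int × List (List Int))
          = (pfx stones (jc + 1 + 1) - pfx stones k,
             mat stones.length (pentry stones k (jc + 1))) := by
        rw [show ((jc : Int) + 1) = ((jc + 1 : Nat) : Int) by push_cast; ring,
            show ((k : Int) + 1) = ((k + 1 : Nat) : Int) by push_cast; ring,
            show ((jc + 1 : Nat) : Int) - 1 = ((jc : Nat) : Int) by push_cast; ring,
            pvIdx_natCast, pvIdx_natCast,
            pvMGet_mat _ (by omega) (by omega), pvMGet_mat _ (by omega) (by omega),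
            pentry_read_down hk, pentry_read_left hk]
        have hval : max (pfx stones (jc + 1) - pfx stones k + stones.getD (jc + 1) 0
                - stones.getD k 0 - g stones (jc - k) (k + 1))
              (pfx stones (jc + 1) - pfx stones k + stones.getD (jc + 1) 0
                - stones.getD (jc + 1) 0 - g stones (jc - k) k)
            = g stones (jc + 1 - k) k := by
          rw [show jc + 1 - k = (jc - k) + 1 by omega]
          show _ = g stones ((jc - k) + 1) k
          simp only [g]
          rw [show k + (jc - k) + 2 = jc + 1 + 1 by omega,
              show k + (jc - k) + 1 = jc + 1 by omega,
              show pfx stones (jc + 1 + 1) = pfx stones (jc + 1) + el stones (jc + 1) from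
                pfx_succ _ _]
          unfold el
          congr 1 <;> ring
        rw [hval, pvMSet_mat _ _ (by omega) hjc1, pentry_write hk,
            show pfx stones (jc + 1) - pfx stones k + stones.getD (jc + 1) 0
              = pfx stones (jc + 1 + 1) - pfx stones k by
                rw [show pfx stones (jc + 1 + 1) = pfx stones (jc + 1) + el stones (jc + 1) from
                  pfx_succ _ _]
                unfold el; ring]
      rw [hstep, show ((jc : Int) + 1) + 1 = ((jc + 1 : Nat) : Int) + 1 by push_cast; ring]
      exact ih (jc + 1) (by omega) (by omega)

-- one outer-loop step turns the "rows ≥ k+1 done" table into "rows ≥ k done"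
lemma outer_step (stones : List Int) (k : Nat) (hk : k + 2 ≤ stones.length) :
    ((PySem.List.pyRange ((k : Int) + 1) (stones.length : Int) 1).foldl
      (fun (p : Int × List (List Int)) j => (p.1 + pvIdx stones j,
        pvMSet p.2 (k : Int) j
          (max (p.1 + pvIdx stones j - pvIdx stones (k : Int) - pvMGet p.2 ((k : Int) + 1) j)
               (p.1 + pvIdx stones j - pvIdx stones j - pvMGet p.2 (k : Int) (j - 1)))))
      (pvIdx stones (k : Int), mat stones.length (fentry stones (k + 1)))).2
    = mat stones.length (fentry stones k) := by
  have h1 : pvIdx stones (k : Int) = pfx stones (k + 1) - pfx stones k := by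
    rw [pvIdx_natCast, pfx_succ]; unfold el; ring
  have h2 : mat stones.length (fentry stones (k + 1)) = mat stones.length (pentry stones k k) := by
    apply mat_congr; intro r j _ _
    unfold fentry pentry
    by_cases hc : k + 1 ≤ r ∧ r < j
    · rw [if_pos hc, if_pos ⟨by omega, hc.2, by omega⟩]
    · rw [if_neg hc, if_neg (by intro h; exact hc ⟨by omega, h.2.1⟩)]
  rw [show ((pvIdx stones (k : Int), mat stones.length (fentry stones (k + 1)))
        : Int × List (List Int))
      = (pfx stones (k + 1) - pfx stones k, mat stones.length (pentry stones k k)) by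
        rw [h1, h2],
      inner_fold stones k (stones.length - (k + 1)) k (le_refl k) (by omega)]
  apply mat_congr; intro r j _ hj
  unfold pentry fentry
  by_cases hc : k ≤ r ∧ r < j
  · rw [if_pos ⟨hc.1, hc.2, by omega⟩, if_pos hc]
  · rw [if_neg (by tauto), if_neg hc]

-- the outer loop from row k-1 down to 0
lemma outer_fold (stones : List Int) :
    ∀ (k : Nat), k ≤ stones.length - 1 → 1 ≤ stones.length →
    (PySem.List.pyRange ((k : Int) - 1) (-1) (-1)).foldl
      (fun (scores : List (List Int)) i =>
        (List.foldl
          (fun (p : Int × List (List Int)) j => (p.1 + pvIdx stones j,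
            pvMSet p.2 i j
              (max (p.1 + pvIdx stones j - pvIdx stones i - pvMGet p.2 (i + 1) j)
                   (p.1 + pvIdx stones j - pvIdx stones j - pvMGet p.2 i (j - 1)))))
          (pvIdx stones i, scores) (PySem.List.pyRange (i + 1) (stones.length : Int) 1)).2)
      (mat stones.length (fentry stones k))
    = mat stones.length (fentry stones 0) := by
  intro k
  induction k with
  | zero =>
      intro _ _
      rw [show ((0 : Nat) : Int) - 1 = -1 by norm_num,
          PySem.List.pyRange_neg_one_eq_nil (by omega), List.foldl_nil]
  | succ k ih =>
      intro hk hn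
      rw [show ((k + 1 : Nat) : Int) - 1 = (k : Int) by push_cast; ring,
          PySem.List.pyRange_neg_one_cons (by omega), List.foldl_cons]
      have hstep := outer_step stones k (by omega)
      rw [hstep]
      exact ih (by omega) hn

theorem stoneGameVII_eq_g (stones : List Int) (h : stones ≠ []) :
    stoneGameVII stones = g stones (stones.length - 1) 0 := by
  have hn : 1 ≤ stones.length := List.length_pos_of_ne_nil h
  show pvMGet
    ((PySem.List.pyRange ((stones.length : Int) - 2) (-1) (-1)).foldl
      (fun (scores : List (List Int)) i =>
        (List.foldl
          (fun (p : Int × List (List Int)) j => (p.1 + pvIdx stones j,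
            pvMSet p.2 i j
              (max (p.1 + pvIdx stones j - pvIdx stones i - pvMGet p.2 (i + 1) j)
                   (p.1 + pvIdx stones j - pvIdx stones j - pvMGet p.2 i (j - 1)))))
          (pvIdx stones i, scores) (PySem.List.pyRange (i + 1) (stones.length : Int) 1)).2)
      (mat stones.length (fun _ _ => 0)))
    0 ((stones.length : Int) - 1) = g stones (stones.length - 1) 0
  have h0 : mat stones.length (fun (_ _ : Nat) => (0 : Int))
      = mat stones.length (fentry stones (stones.length - 1)) := by
    apply mat_congr; intro r j _ hj
    unfold fentry
    rw [if_neg (by omega)]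
  rw [h0, show ((stones.length : Int) - 2) = ((stones.length - 1 : Nat) : Int) - 1 by omega,
      outer_fold stones (stones.length - 1) (le_refl _) hn,
      show ((stones.length : Int) - 1) = ((stones.length - 1 : Nat) : Int) by omega,
      show ((0 : Int)) = ((0 : Nat) : Int) by norm_num,
      pvMGet_mat _ (by omega) (by omega)]
  unfold fentry
  rcases Nat.lt_or_ge 1 stones.length with h1 | h1
  · rw [if_pos ⟨le_refl _, by omega⟩, Nat.sub_zero]
  · rw [if_neg (by omega), show stones.length - 1 = 0 by omega]
    simp [g]

-- ===== VERDICT (by name: the statement is the Claim_ definition above) =====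
theorem stoneGameVII_spec : Claim_equal_stoneGameVII := by
  intro stones _ hpre
  unfold Spec_stoneGameVII
  rw [stoneGameVII_eq_g stones hpre, stoneGameVII_alt_eq_g stones hpre]
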